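-- pv_equiv track=rewrite | github.com/braydio/CUSTODIAN | game/simulations/world_state/terminal/parser.py | resolve_sector_name
-- ===== SOURCE A (Python) =====
-- from typing import Dict, Iterable, List, Optional, Tuple
--
-- def resolve_sector_name(
--     query: str, sector_names: Iterable[str]
-- ) -> Tuple[Optional[str], Optional[str]]:
--     """Resolve a sector name using exact, prefix, then contains matching.
--
--     Args:
--         query: Sector query string.
--         sector_names: Iterable of sector names to match against.
--
--     Returns:
--         Tuple of (resolved_name, error_message). Error message is populated
--         when resolution fails or is ambiguous.
--     """
--
--     normalized_query = query.strip().casefold()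
--     if not normalized_query:
--         return None, "Sector name required."
--
--     normalized_sectors = {name.casefold(): name for name in sector_names}
--     if normalized_query in normalized_sectors:
--         return normalized_sectors[normalized_query], None
--
--     prefix_matches = [
--         name
--         for norm, name in normalized_sectors.items()
--         if norm.startswith(normalized_query)
--     ]
--     if len(prefix_matches) == 1:
--         return prefix_matches[0], None
--     if len(prefix_matches) > 1:
--         return None, f"Sector match ambiguous: {', '.join(sorted(prefix_matches))}."
--
--     contains_matches = [
--         name for norm, name in normalized_sectors.items() if normalized_query in norm
--     ]
--     if len(contains_matches) == 1:
--         return contains_matches[0], None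
--     if len(contains_matches) > 1:
--         return None, f"Sector match ambiguous: {', '.join(sorted(contains_matches))}."
--
--     return None, "Sector not found."
-- ===== SOURCE B (Python) =====
-- def _pick(matches):
--     """Resolve a candidate list: None if empty, the unique hit, or an ambiguity error."""
--     if not matches:
--         return None
--     if len(matches) == 1:
--         return matches[0], None
--     return None, "Sector match ambiguous: {}.".format(", ".join(sorted(matches)))
--
--
-- def resolve_sector_name(query, sector_names):
--     normalized_query = query.strip().casefold()
--     if not normalized_query:
--         return None, "Sector name required."
--
--     normalized_sectors = {name.casefold(): name for name in sector_names}
--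
--     exact = None
--     prefix_matches = []
--     contains_matches = []
--     for norm, name in normalized_sectors.items():
--         if exact is None and norm == normalized_query:
--             exact = name
--         if norm.startswith(normalized_query):
--             prefix_matches.append(name)
--         if normalized_query in norm:
--             contains_matches.append(name)
--
--     if exact is not None:
--         return exact, None
--     for matches in (prefix_matches, contains_matches):
--         resolved = _pick(matches)
--         if resolved is not None:
--             return resolved
--     return None, "Sector not found."
-- ===== Notes on version B (the rewrite author's own statement) =====
-- stated objective: alternative
-- what changed: A makes three separate passes over the normalized dict (membership lookup, prefix comprehension, contains comprehension) with inline len==1/len>1 branching; B makes one fused pass over the items collecting exact/prefix/contains candidates simultaneously and resolves them with a shared _pick helper in priority order.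
import Mathlib
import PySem

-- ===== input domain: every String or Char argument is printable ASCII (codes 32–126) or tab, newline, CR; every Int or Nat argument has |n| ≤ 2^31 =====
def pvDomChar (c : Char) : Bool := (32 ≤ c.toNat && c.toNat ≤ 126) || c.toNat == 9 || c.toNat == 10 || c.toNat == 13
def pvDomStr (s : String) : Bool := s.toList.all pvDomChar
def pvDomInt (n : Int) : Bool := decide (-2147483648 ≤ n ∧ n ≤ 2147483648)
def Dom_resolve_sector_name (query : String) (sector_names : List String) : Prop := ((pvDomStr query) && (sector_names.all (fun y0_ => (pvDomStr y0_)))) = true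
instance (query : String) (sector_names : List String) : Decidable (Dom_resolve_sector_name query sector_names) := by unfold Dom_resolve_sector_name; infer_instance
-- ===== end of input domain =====

-- B fuses A's three passes over the normalized dict into one candidate-collecting pass with a
-- shared resolution helper; same results, different decomposition (no speed claim).
-- (casefold is ported as PySem.Str.lower: they coincide on the ASCII domain.)

-- ===== PORT A =====
def resolve_sector_name (query : String) (sector_names : List String) : Option String × Option String :=
  let nq := PySem.Str.lower (PySem.Str.strip query)
  if nq = "" then (none, some "Sector name required.")
  else
    let d := sector_names.foldl (fun d name => d.insert (PySem.Str.lower name) name) PySem.Dict.empty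
    if d.contains nq then (d.get? nq, none)
    else
      let prefix_matches := (d.items.filter (fun p => PySem.Str.startswith p.1 nq)).map (·.2)
      if prefix_matches.length = 1 then (PySem.List.pyGet? prefix_matches 0, none)
      else if prefix_matches.length > 1 then
        (none, some ("Sector match ambiguous: " ++ PySem.Str.join ", " (PySem.List.sorted prefix_matches (fun x => x) false) ++ "."))
      else
        let contains_matches := (d.items.filter (fun p => PySem.Str.isIn nq p.1)).map (·.2)
        if contains_matches.length = 1 then (PySem.List.pyGet? contains_matches 0, none)
        else if contains_matches.length > 1 then
          (none, some ("Sector match ambiguous: " ++ PySem.Str.join ", " (PySem.List.sorted contains_matches (fun x => x) false) ++ "."))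
        else (none, some "Sector not found.")

-- ===== PORT B =====
-- _pick from Source B
def pvPick (ms : List String) : Option (Option String × Option String) :=
  match ms with
  | [] => none
  | [m] => some (some m, none)
  | _ => some (none, some ("Sector match ambiguous: " ++ PySem.Str.join ", " (PySem.List.sorted ms (fun x => x) false) ++ "."))

def resolve_sector_name_alt (query : String) (sector_names : List String) : Option String × Option String :=
  let nq := PySem.Str.lower (PySem.Str.strip query)
  if nq = "" then (none, some "Sector name required.")
  else
    let d := sector_names.foldl (fun d name => d.insert (PySem.Str.lower name) name) PySem.Dict.empty
    let acc := d.items.foldl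
      (fun (acc : Option String × List String × List String) p =>
        ( if acc.1.isNone && p.1 == nq then some p.2 else acc.1,
          if PySem.Str.startswith p.1 nq then acc.2.1 ++ [p.2] else acc.2.1,
          if PySem.Str.isIn nq p.1 then acc.2.2 ++ [p.2] else acc.2.2 ))
      (none, [], [])
    match acc.1 with
    | some name => (some name, none)
    | none =>
      match pvPick acc.2.1 with
      | some r => r
      | none =>
        match pvPick acc.2.2 with
        | some r => r
        | none => (none, some "Sector not found.")

-- ===== PRECONDITION & SPEC =====
def Spec_resolve_sector_name (query : String) (sector_names : List String) (out : Option String × Option String) : Prop := out = resolve_sector_name_alt query sector_names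
instance (query : String) (sector_names : List String) (out : Option String × Option String) : Decidable (Spec_resolve_sector_name query sector_names out) := by unfold Spec_resolve_sector_name; infer_instance

-- ===== CLAIM (what is proved, stated in full; the proofs are below) =====
def Claim_equal_resolve_sector_name : Prop := ∀ (query : String) (sector_names : List String), Dom_resolve_sector_name query sector_names → Spec_resolve_sector_name query sector_names (resolve_sector_name query sector_names)

-- ===== LEMMAS AND PROOFS =====

-- B's fused fold computes: first exact hit, the prefix hits in order, the contains hits in order.
theorem pvFold3_spec (nq : String) (l : List (String × String)) :
    ∀ (e : Option String) (p c : List String),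
      l.foldl
        (fun (acc : Option String × List String × List String) q =>
          ( if acc.1.isNone && q.1 == nq then some q.2 else acc.1,
            if PySem.Str.startswith q.1 nq then acc.2.1 ++ [q.2] else acc.2.1,
            if PySem.Str.isIn nq q.1 then acc.2.2 ++ [q.2] else acc.2.2 )) (e, p, c)
      = (e.or ((l.find? (fun q => q.1 == nq)).map (·.2)),
         p ++ (l.filter (fun q => PySem.Str.startswith q.1 nq)).map (·.2),
         c ++ (l.filter (fun q => PySem.Str.isIn nq q.1)).map (·.2)) := by
  induction l with
  | nil => intro e p c; simp
  | cons hd tl ih =>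
    intro e p c
    simp only [List.foldl_cons, ih, List.find?_cons, List.filter_cons]
    cases e with
    | some x =>
      cases h1 : hd.1 == nq <;> by_cases h2 : PySem.Str.startswith hd.1 nq = true <;>
        by_cases h3 : PySem.Str.isIn nq hd.1 = true <;>
        simp_all [List.find?_cons, h1]
    | none =>
      cases h1 : hd.1 == nq <;> by_cases h2 : PySem.Str.startswith hd.1 nq = true <;>
        by_cases h3 : PySem.Str.isIn nq hd.1 = true <;>
        simp_all [List.find?_cons, h1]

-- Dict lookup is the first matching item.
theorem pvGet?_eq_find? (d : PySem.Dict String String) (k : String) :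
    d.get? k = (d.items.find? (fun q => q.1 == k)).map (·.2) := by
  cases d with
  | mk l =>
    induction l with
    | nil => simp [PySem.Dict.get?, PySem.Dict.items]
    | cons hd tl ih =>
      rcases hd with ⟨a, b⟩
      rw [PySem.Dict.get?_mk_cons]
      by_cases h : (a == k) = true
      · simp [PySem.Dict.items, List.find?_cons, h]
      · simp only [PySem.Dict.items] at ih ⊢
        simp [List.find?_cons, h, ih]

-- ===== VERDICT (by name: the statement is the Claim_ definition above) =====
theorem resolve_sector_name_spec : Claim_equal_resolve_sector_name := by
  intro query sector_names _
  unfold Spec_resolve_sector_name resolve_sector_name resolve_sector_name_alt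
  set nq := PySem.Str.lower (PySem.Str.strip query) with hnq
  by_cases hq : nq = ""
  · simp [hq]
  · simp only [hq, if_false]
    set d := sector_names.foldl (fun d name => d.insert (PySem.Str.lower name) name) PySem.Dict.empty with hd
    rw [pvFold3_spec]
    simp only [List.nil_append, Option.none_or]
    rw [PySem.Dict.contains_eq_isSome_get?, pvGet?_eq_find?]
    cases hF : (d.items.find? (fun q => q.1 == nq)) with
    | some pr => simp
    | none =>
      simp only [hF, Option.map_none, Option.isSome_none, Bool.false_eq_true, if_false]
      generalize (d.items.filter (fun q => PySem.Str.startswith q.1 nq)).map (fun x => x.2) = P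
      generalize (d.items.filter (fun q => PySem.Str.isIn nq q.1)).map (fun x => x.2) = C
      cases P with
      | cons m t =>
        cases t with
        | nil => simp [pvPick, PySem.List.pyGet?, PySem.List.pyIdx?]
        | cons m2 t2 => simp [pvPick]
      | nil =>
        cases C with
        | cons m t =>
          cases t with
          | nil => simp [pvPick, PySem.List.pyGet?, PySem.List.pyIdx?]
          | cons m2 t2 => simp [pvPick]
        | nil => simp [pvPick]
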